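-- pv_equiv track=rewrite | github.com/howekatie/slotter | slotter/utils.py | will_combo_together
-- ===== SOURCE A (Python) =====
-- def will_combo_together(timeslots, working_combos):
--     """
--     Takes all of the combos from pull_students. Makes a new dict where each key is a timeslot and its corresponding value is a list of the timeslots that are compatible with it (according to the combos from pull_students).
--     """
--     lookup_dict = {}
--     combo_times = []
--     for timeslot in timeslots:
--         for combo in working_combos:
--             if timeslot in combo:
--                 for time in combo:
--                     if timeslot != time:
--                         if time not in combo_times:
--                             combo_times.append(time)
--         combo_times.sort()
--         if len(combo_times) > 0:
--             lookup_dict[timeslot] = combo_times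
--         combo_times = []
--     return lookup_dict
-- ===== SOURCE B (Python) =====
-- def will_combo_together(timeslots, working_combos):
--     """
--     Single pass over working_combos building a dict-of-sets adjacency map,
--     then one lookup (plus a sort) per timeslot.
--     """
--     adj = {}
--     for combo in working_combos:
--         for t in combo:
--             for u in combo:
--                 if u != t:
--                     adj.setdefault(t, set()).add(u)
--     result = {}
--     for ts in timeslots:
--         if ts in adj:
--             result[ts] = sorted(adj[ts])
--     return result
-- ===== Notes on version B (the rewrite author's own statement) =====
-- stated objective: faster
-- what changed: Instead of rescanning every combo for every timeslot, B makes a single pass over working_combos building a dict-of-sets adjacency map keyed by timeslot, then answers each timeslot with one dict lookup plus a sort.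
import Mathlib
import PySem

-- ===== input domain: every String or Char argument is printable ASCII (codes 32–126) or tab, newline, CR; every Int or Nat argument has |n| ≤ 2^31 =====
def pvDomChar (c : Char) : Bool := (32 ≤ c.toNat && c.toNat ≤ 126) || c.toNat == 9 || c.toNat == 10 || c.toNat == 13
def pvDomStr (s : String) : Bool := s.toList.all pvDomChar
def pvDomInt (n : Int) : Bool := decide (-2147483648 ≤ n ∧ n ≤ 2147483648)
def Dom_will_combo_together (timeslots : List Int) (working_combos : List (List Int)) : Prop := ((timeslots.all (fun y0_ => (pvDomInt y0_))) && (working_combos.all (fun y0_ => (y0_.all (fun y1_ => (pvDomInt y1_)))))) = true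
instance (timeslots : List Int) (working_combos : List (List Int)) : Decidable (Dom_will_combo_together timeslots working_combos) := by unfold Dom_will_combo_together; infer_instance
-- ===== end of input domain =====

-- B replaces A's per-timeslot rescan of all combos by one adjacency dict-of-sets
-- built in a single pass over the combos (objective: faster).

-- ===== PORT A =====
-- the body of A's outer loop: scan all combos, collecting the distinct partners of `timeslot`
def pvComboTimes (timeslot : Int) (working_combos : List (List Int)) : List Int :=
  working_combos.foldl (fun combo_times combo =>
    if timeslot ∈ combo then
      combo.foldl (fun combo_times time =>
        if timeslot ≠ time then
          if time ∈ combo_times then combo_times else combo_times ++ [time]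
        else combo_times) combo_times
    else combo_times) []

def will_combo_together (timeslots : List Int) (working_combos : List (List Int)) : List (Int × List Int) :=
  (timeslots.foldl (fun lookup_dict timeslot =>
      let combo_times := PySem.List.sorted (pvComboTimes timeslot working_combos) (fun x => x) false
      if combo_times.length > 0 then lookup_dict.insert timeslot combo_times else lookup_dict)
    PySem.Dict.empty).items

-- ===== PORT B =====
-- the adjacency pass of Source B: adj.setdefault(t, set()).add(u) for every ordered pair u ≠ t of a combo
def pvBuildAdj (working_combos : List (List Int)) : PySem.Dict Int (PySem.Set Int) :=
  working_combos.foldl (fun adj combo =>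
    combo.foldl (fun adj t =>
      combo.foldl (fun adj u =>
        if u ≠ t then adj.modify t PySem.Set.empty (fun s => PySem.Set.add s u) else adj) adj) adj)
    PySem.Dict.empty

def will_combo_together_alt (timeslots : List Int) (working_combos : List (List Int)) : List (Int × List Int) :=
  let adj := pvBuildAdj working_combos
  (timeslots.foldl (fun result ts =>
      if adj.contains ts then
        result.insert ts (PySem.List.sorted (adj.getD ts PySem.Set.empty) (fun x => x) false)
      else result)
    PySem.Dict.empty).items

-- ===== PRECONDITION & SPEC =====
def Spec_will_combo_together (timeslots : List Int) (working_combos : List (List Int)) (out : List (Int × List Int)) : Prop := out = will_combo_together_alt timeslots working_combos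
instance (timeslots : List Int) (working_combos : List (List Int)) (out : List (Int × List Int)) : Decidable (Spec_will_combo_together timeslots working_combos out) := by unfold Spec_will_combo_together; infer_instance

-- ===== CLAIM (what is proved, stated in full; the proofs are below) =====
def Claim_equal_will_combo_together : Prop := ∀ (timeslots : List Int) (working_combos : List (List Int)), Dom_will_combo_together timeslots working_combos → Spec_will_combo_together timeslots working_combos (will_combo_together timeslots working_combos)

-- ===== LEMMAS AND PROOFS =====

-- ---- A side: characterise pvComboTimes ----
theorem pvA_inner_mem (t : Int) (c : List Int) : ∀ (acc : List Int) (x : Int),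
    x ∈ c.foldl (fun combo_times time =>
        if t ≠ time then
          if time ∈ combo_times then combo_times else combo_times ++ [time]
        else combo_times) acc
      ↔ x ∈ acc ∨ (x ∈ c ∧ x ≠ t) := by
  induction c with
  | nil => simp
  | cons time rest ih =>
    intro acc x
    simp only [List.foldl_cons, ih, List.mem_cons]
    by_cases h : t ≠ time
    · by_cases hm : time ∈ acc
      · rw [if_pos h, if_pos hm]; aesop
      · rw [if_pos h, if_neg hm]
        simp only [List.mem_append, List.mem_cons, List.not_mem_nil]; aesop
    · have h' : t = time := by omega
      subst h'
      rw [if_neg h]; aesop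

theorem pvA_inner_nodup (t : Int) (c : List Int) : ∀ (acc : List Int), acc.Nodup →
    (c.foldl (fun combo_times time =>
        if t ≠ time then
          if time ∈ combo_times then combo_times else combo_times ++ [time]
        else combo_times) acc).Nodup := by
  induction c with
  | nil => intro acc h; simpa using h
  | cons time rest ih =>
    intro acc h
    simp only [List.foldl_cons]
    apply ih
    by_cases hne : t ≠ time
    · by_cases hm : time ∈ acc
      · simp [hne, hm, h]
      · simp [hne, hm]; exact List.Nodup.append h (by simp) (by simpa using fun hx => hm hx)
    · simp [hne, h]

theorem pvComboTimes_mem (t : Int) (combos : List (List Int)) (x : Int) :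
    x ∈ pvComboTimes t combos ↔ ∃ c ∈ combos, t ∈ c ∧ x ∈ c ∧ x ≠ t := by
  unfold pvComboTimes
  suffices h : ∀ (acc : List Int),
      x ∈ combos.foldl (fun combo_times combo =>
        if t ∈ combo then
          combo.foldl (fun combo_times time =>
            if t ≠ time then
              if time ∈ combo_times then combo_times else combo_times ++ [time]
            else combo_times) combo_times
        else combo_times) acc
      ↔ x ∈ acc ∨ ∃ c ∈ combos, t ∈ c ∧ x ∈ c ∧ x ≠ t by
    simpa using h []
  induction combos with
  | nil => simp
  | cons c rest ih =>
    intro acc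
    simp only [List.foldl_cons]
    by_cases hc : t ∈ c
    · rw [if_pos hc, ih, pvA_inner_mem]
      simp only [List.exists_mem_cons_iff]; aesop
    · rw [if_neg hc, ih]
      simp only [List.exists_mem_cons_iff]; aesop

theorem pvComboTimes_nodup (t : Int) (combos : List (List Int)) :
    (pvComboTimes t combos).Nodup := by
  unfold pvComboTimes
  suffices h : ∀ (acc : List Int), acc.Nodup →
      (combos.foldl (fun combo_times combo =>
        if t ∈ combo then
          combo.foldl (fun combo_times time =>
            if t ≠ time then
              if time ∈ combo_times then combo_times else combo_times ++ [time]
            else combo_times) combo_times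
        else combo_times) acc).Nodup from h [] (by simp)
  induction combos with
  | nil => intro acc h; simpa using h
  | cons c rest ih =>
    intro acc h
    simp only [List.foldl_cons]
    apply ih
    by_cases hc : t ∈ c
    · rw [if_pos hc]; exact pvA_inner_nodup t c acc h
    · rw [if_neg hc]; exact h

-- ---- B side: characterise pvBuildAdj ----
theorem pvB_foldU_getD (t : Int) (us : List Int) : ∀ (adj : PySem.Dict Int (PySem.Set Int)) (k x : Int),
    x ∈ (us.foldl (fun adj u =>
        if u ≠ t then adj.modify t PySem.Set.empty (fun s => PySem.Set.add s u) else adj) adj).getD k PySem.Set.empty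
      ↔ x ∈ adj.getD k PySem.Set.empty ∨ (k = t ∧ x ∈ us ∧ x ≠ t) := by
  induction us with
  | nil => simp
  | cons u rest ih =>
    intro adj k x
    simp only [List.foldl_cons, ih]
    by_cases hu : u ≠ t
    · rw [if_pos hu]
      rw [PySem.Dict.getD_modify]
      by_cases hk : k = t
      · subst hk
        rw [if_pos rfl, PySem.Set.mem_add]
        simp only [List.mem_cons]; aesop
      · rw [if_neg hk]; simp only [List.mem_cons]; aesop
    · rw [if_neg hu]
      have hu' : u = t := by omega
      subst hu'
      simp only [List.mem_cons]; aesop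

theorem pvB_foldU_contains (t : Int) (us : List Int) : ∀ (adj : PySem.Dict Int (PySem.Set Int)) (k : Int),
    (us.foldl (fun adj u =>
        if u ≠ t then adj.modify t PySem.Set.empty (fun s => PySem.Set.add s u) else adj) adj).contains k = true
      ↔ adj.contains k = true ∨ (k = t ∧ ∃ u ∈ us, u ≠ t) := by
  induction us with
  | nil => simp
  | cons u rest ih =>
    intro adj k
    simp only [List.foldl_cons, ih]
    by_cases hu : u ≠ t
    · rw [if_pos hu, PySem.Dict.contains_modify]
      simp only [Bool.or_eq_true, beq_iff_eq, List.exists_mem_cons_iff]; aesop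
    · rw [if_neg hu]
      have hu' : u = t := by omega
      subst hu'
      simp only [List.exists_mem_cons_iff]; aesop

theorem pvB_foldU_nodup (t : Int) (us : List Int) : ∀ (adj : PySem.Dict Int (PySem.Set Int)),
    (∀ k, (adj.getD k PySem.Set.empty).Nodup) →
    ∀ k, ((us.foldl (fun adj u =>
        if u ≠ t then adj.modify t PySem.Set.empty (fun s => PySem.Set.add s u) else adj) adj).getD k PySem.Set.empty).Nodup := by
  induction us with
  | nil => intro adj h k; simpa using h k
  | cons u rest ih =>
    intro adj h k
    simp only [List.foldl_cons]
    apply ih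
    intro k'
    by_cases hu : u ≠ t
    · rw [if_pos hu, PySem.Dict.getD_modify]
      by_cases hk : k' = t
      · rw [if_pos hk]; exact PySem.Set.nodup_add _ _ (h t)
      · rw [if_neg hk]; exact h k'
    · rw [if_neg hu]; exact h k'

theorem pvB_foldT_getD (c : List Int) (ts : List Int) : ∀ (adj : PySem.Dict Int (PySem.Set Int)) (k x : Int),
    x ∈ (ts.foldl (fun adj t =>
        c.foldl (fun adj u =>
          if u ≠ t then adj.modify t PySem.Set.empty (fun s => PySem.Set.add s u) else adj) adj) adj).getD k PySem.Set.empty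
      ↔ x ∈ adj.getD k PySem.Set.empty ∨ (k ∈ ts ∧ x ∈ c ∧ x ≠ k) := by
  induction ts with
  | nil => simp
  | cons t rest ih =>
    intro adj k x
    simp only [List.foldl_cons, ih, pvB_foldU_getD]
    simp only [List.mem_cons]; aesop

theorem pvB_foldT_contains (c : List Int) (ts : List Int) : ∀ (adj : PySem.Dict Int (PySem.Set Int)) (k : Int),
    (ts.foldl (fun adj t =>
        c.foldl (fun adj u =>
          if u ≠ t then adj.modify t PySem.Set.empty (fun s => PySem.Set.add s u) else adj) adj) adj).contains k = true
      ↔ adj.contains k = true ∨ (k ∈ ts ∧ ∃ u ∈ c, u ≠ k) := by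
  induction ts with
  | nil => simp
  | cons t rest ih =>
    intro adj k
    simp only [List.foldl_cons, ih, pvB_foldU_contains]
    simp only [List.mem_cons]; aesop

theorem pvB_foldT_nodup (c : List Int) (ts : List Int) : ∀ (adj : PySem.Dict Int (PySem.Set Int)),
    (∀ k, (adj.getD k PySem.Set.empty).Nodup) →
    ∀ k, ((ts.foldl (fun adj t =>
        c.foldl (fun adj u =>
          if u ≠ t then adj.modify t PySem.Set.empty (fun s => PySem.Set.add s u) else adj) adj) adj).getD k PySem.Set.empty).Nodup := by
  induction ts with
  | nil => intro adj h k; simpa using h k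
  | cons t rest ih =>
    intro adj h k
    simp only [List.foldl_cons]
    exact ih _ (pvB_foldU_nodup t c adj h) k

theorem pvBuildAdj_getD (combos : List (List Int)) (k x : Int) :
    x ∈ (pvBuildAdj combos).getD k PySem.Set.empty ↔ ∃ c ∈ combos, k ∈ c ∧ x ∈ c ∧ x ≠ k := by
  unfold pvBuildAdj
  suffices h : ∀ (adj : PySem.Dict Int (PySem.Set Int)),
      x ∈ (combos.foldl (fun adj combo =>
        combo.foldl (fun adj t =>
          combo.foldl (fun adj u =>
            if u ≠ t then adj.modify t PySem.Set.empty (fun s => PySem.Set.add s u) else adj) adj) adj) adj).getD k PySem.Set.empty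
      ↔ x ∈ adj.getD k PySem.Set.empty ∨ ∃ c ∈ combos, k ∈ c ∧ x ∈ c ∧ x ≠ k by
    simpa [PySem.Set.empty] using h PySem.Dict.empty
  induction combos with
  | nil => simp
  | cons c rest ih =>
    intro adj
    simp only [List.foldl_cons, ih, pvB_foldT_getD]
    simp only [List.exists_mem_cons_iff]; aesop

theorem pvBuildAdj_contains (combos : List (List Int)) (k : Int) :
    (pvBuildAdj combos).contains k = true ↔ ∃ c ∈ combos, k ∈ c ∧ ∃ u ∈ c, u ≠ k := by
  unfold pvBuildAdj
  suffices h : ∀ (adj : PySem.Dict Int (PySem.Set Int)),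
      (combos.foldl (fun adj combo =>
        combo.foldl (fun adj t =>
          combo.foldl (fun adj u =>
            if u ≠ t then adj.modify t PySem.Set.empty (fun s => PySem.Set.add s u) else adj) adj) adj) adj).contains k = true
      ↔ adj.contains k = true ∨ ∃ c ∈ combos, k ∈ c ∧ ∃ u ∈ c, u ≠ k by
    simpa using h PySem.Dict.empty
  induction combos with
  | nil => simp
  | cons c rest ih =>
    intro adj
    simp only [List.foldl_cons, ih, pvB_foldT_contains]
    simp only [List.exists_mem_cons_iff]; aesop

theorem pvBuildAdj_nodup (combos : List (List Int)) (k : Int) :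
    ((pvBuildAdj combos).getD k PySem.Set.empty).Nodup := by
  unfold pvBuildAdj
  suffices h : ∀ (adj : PySem.Dict Int (PySem.Set Int)),
      (∀ k, (adj.getD k PySem.Set.empty).Nodup) →
      ∀ k, ((combos.foldl (fun adj combo =>
        combo.foldl (fun adj t =>
          combo.foldl (fun adj u =>
            if u ≠ t then adj.modify t PySem.Set.empty (fun s => PySem.Set.add s u) else adj) adj) adj) adj).getD k PySem.Set.empty).Nodup by
    exact h PySem.Dict.empty (by simp [PySem.Set.empty]) k
  induction combos with
  | nil => intro adj h k; simpa using h k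
  | cons c rest ih =>
    intro adj h k
    simp only [List.foldl_cons]
    exact ih _ (pvB_foldT_nodup c c adj h) k

-- ---- per-timeslot agreement ----
theorem pv_value_eq (t : Int) (combos : List (List Int)) :
    PySem.List.sorted (pvComboTimes t combos) (fun x => x) false
      = PySem.List.sorted ((pvBuildAdj combos).getD t PySem.Set.empty) (fun x => x) false := by
  rw [PySem.List.sorted_id_eq_sorted_id_iff_perm]
  rw [List.perm_ext_iff_of_nodup (pvComboTimes_nodup t combos) (pvBuildAdj_nodup combos t)]
  intro x
  rw [pvComboTimes_mem, pvBuildAdj_getD]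

theorem pv_cond_eq (t : Int) (combos : List (List Int)) :
    ((PySem.List.sorted (pvComboTimes t combos) (fun x => x) false).length > 0)
      ↔ (pvBuildAdj combos).contains t = true := by
  rw [PySem.List.length_sorted, pvBuildAdj_contains]
  constructor
  · intro h
    have hne : pvComboTimes t combos ≠ [] := by
      intro hnil; rw [hnil] at h; simp at h
    obtain ⟨x, hx⟩ := List.exists_mem_of_ne_nil _ hne
    obtain ⟨c, hc, htc, hxc, hxt⟩ := (pvComboTimes_mem t combos x).1 hx
    exact ⟨c, hc, htc, x, hxc, hxt⟩
  · rintro ⟨c, hc, htc, u, huc, hut⟩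
    have : u ∈ pvComboTimes t combos := (pvComboTimes_mem t combos u).2 ⟨c, hc, htc, huc, hut⟩
    cases h : pvComboTimes t combos with
    | nil => rw [h] at this; simp at this
    | cons a l => simp

-- ===== VERDICT (by name: the statement is the Claim_ definition above) =====
theorem will_combo_together_spec : Claim_equal_will_combo_together := by
  intro timeslots working_combos _
  unfold Spec_will_combo_together will_combo_together will_combo_together_alt
  congr 1
  apply List.foldl_ext
  intro d t _
  by_cases h : (PySem.List.sorted (pvComboTimes t working_combos) (fun x => x) false).length > 0
  · rw [if_pos h, if_pos ((pv_cond_eq t working_combos).1 h), pv_value_eq]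
  · rw [if_neg h, if_neg (by intro hc; exact h ((pv_cond_eq t working_combos).2 hc))]
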